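-- pv_equiv track=rewrite | github.com/nytud/bert_coref_hu | src/bert_coref/relabel.py | collect_documents
-- ===== SOURCE A (Python) =====
-- from typing import (
--     Union, List, Sequence,
--     Iterable, Generator, Set, FrozenSet
-- )
--
-- def collect_documents(lines: Iterable[str]) -> Generator[List[str], None, None]:
--     """Collect documents as lists of strings.
--
--     Args:
--         lines: The input text lines where double blank lines
--             are used to separate documents.
--
--     Returns:
--         A generator the yields documents as lists of text lines.
--     """
--     document = []
--     is_prev_blank = False
--     for line in lines:
--         is_blank = len(line.strip()) == 0
--         if all((is_prev_blank, is_blank, len(document) != 0)):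
--             yield document
--             document = []
--         elif not (is_blank and is_prev_blank):
--             document.append(line)
--         is_prev_blank = is_blank
--     if len(document) != 0:
--         yield document
-- ===== SOURCE B (Python) =====
-- from itertools import groupby
-- from typing import Iterable, List, Generator
--
--
-- def collect_documents(lines: Iterable[str]) -> Generator[List[str], None, None]:
--     """Collect documents (lists of lines) separated by double blank lines,
--     walking runs of equal blankness with itertools.groupby."""
--     document = []
--     for is_blank, group in groupby(lines, key=lambda l: len(l.strip()) == 0):
--         run = list(group)
--         if is_blank:
--             document.append(run[0])
--             if len(run) >= 2:
--                 yield document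
--                 document = []
--         else:
--             document.extend(run)
--     if document:
--         yield document
-- ===== Notes on version B (the rewrite author's own statement) =====
-- stated objective: alternative
-- what changed: Replaced the is_prev_blank flag machine with an itertools.groupby pass over runs of equal blankness: a non-blank run extends the document, a blank run contributes its first line and yields the document when the run has length >= 2.
import Mathlib
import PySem

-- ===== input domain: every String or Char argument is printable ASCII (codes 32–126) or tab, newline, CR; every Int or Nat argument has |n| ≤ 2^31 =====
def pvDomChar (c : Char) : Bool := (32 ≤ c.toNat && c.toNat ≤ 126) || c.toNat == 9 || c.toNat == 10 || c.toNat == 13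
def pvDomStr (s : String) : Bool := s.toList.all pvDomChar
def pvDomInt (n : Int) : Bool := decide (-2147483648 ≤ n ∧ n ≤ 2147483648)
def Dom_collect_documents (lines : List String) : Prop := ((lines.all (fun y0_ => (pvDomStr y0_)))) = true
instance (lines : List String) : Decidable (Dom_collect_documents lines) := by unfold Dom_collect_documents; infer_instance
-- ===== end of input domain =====

-- B walks groupby-style runs of equal blankness instead of A's is_prev_blank flag machine; same values, alternative decomposition.

-- ===== PORT A =====
-- line is blank iff len(line.strip()) == 0
def pvBlank (line : String) : Bool := PySem.Str.len (PySem.Str.strip line) == 0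

-- one iteration of A's for-loop over state (out-so-far, document, is_prev_blank)
def pvStepA (s : List (List String) × List String × Bool) (line : String) :
    List (List String) × List String × Bool :=
  let (out, document, is_prev_blank) := s
  let is_blank := pvBlank line
  if is_prev_blank && is_blank && (document.length != 0) then
    (out ++ [document], [], is_blank)
  else if !(is_blank && is_prev_blank) then
    (out, document ++ [line], is_blank)
  else
    (out, document, is_blank)

def collect_documents (lines : List String) : List (List String) :=
  let (out, document, _) := lines.foldl pvStepA ([], [], false)
  if document.length != 0 then out ++ [document] else out

-- ===== PORT B =====
-- itertools.groupby(lines, key=blank): maximal consecutive runs, tagged by their key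
def pvRunsAux (b : Bool) (cur : List String) : List String → List (Bool × List String)
  | [] => [(b, cur.reverse)]
  | x :: xs =>
      if pvBlank x == b then pvRunsAux b (x :: cur) xs
      else (b, cur.reverse) :: pvRunsAux (pvBlank x) [x] xs

def pvRuns : List String → List (Bool × List String)
  | [] => []
  | x :: xs => pvRunsAux (pvBlank x) [x] xs

-- B's loop over the groupby runs, carrying the current document
def pvGoB (document : List String) : List (Bool × List String) → List (List String)
  | [] => if document ≠ [] then [document] else []
  | (is_blank, run) :: rest =>
      if is_blank then
        let document := document ++ run.take 1   -- run[0]; groupby runs are nonempty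
        if run.length ≥ 2 then document :: pvGoB [] rest else pvGoB document rest
      else pvGoB (document ++ run) rest

def collect_documents_alt (lines : List String) : List (List String) :=
  pvGoB [] (pvRuns lines)

-- ===== PRECONDITION & SPEC =====
def Spec_collect_documents (lines : List String) (out : List (List String)) : Prop := out = collect_documents_alt lines
instance (lines : List String) (out : List (List String)) : Decidable (Spec_collect_documents lines out) := by unfold Spec_collect_documents; infer_instance

-- ===== CLAIM (what is proved, stated in full; the proofs are below) =====
def Claim_equal_collect_documents : Prop := ∀ (lines : List String), Dom_collect_documents lines → Spec_collect_documents lines (collect_documents lines)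

-- ===== LEMMAS AND PROOFS =====

-- finalize A's loop state into its return value
def pvFinA (s : List (List String) × List String × Bool) : List (List String) :=
  if s.2.1.length != 0 then s.1 ++ [s.2.1] else s.1

lemma pvFinA_eq (out : List (List String)) (doc : List String) (b : Bool) :
    pvFinA (out, doc, b) = out ++ (if doc ≠ [] then [doc] else []) := by
  rcases doc with _ | _ <;> simp [pvFinA]

-- A over a run of non-blank lines just appends them all, ending with is_prev_blank = false
lemma foldA_nonblank (t : List String) (ht : ∀ l ∈ t, pvBlank l = false) :
    ∀ (out : List (List String)) (doc : List String),
      List.foldl pvStepA (out, doc, false) t = (out, doc ++ t, false) := by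
  induction t with
  | nil => intro out doc; simp
  | cons x xs ih =>
    intro out doc
    have hx : pvBlank x = false := ht x (by simp)
    have hxs : ∀ l ∈ xs, pvBlank l = false := fun l hl => ht l (by simp [hl])
    have hstep : pvStepA (out, doc, false) x = (out, doc ++ [x], false) := by
      simp [pvStepA, hx]
    rw [List.foldl_cons, hstep, ih hxs]
    simp

-- A over blank lines from state ([], true) does nothing
lemma foldA_blank_idle (t : List String) (ht : ∀ l ∈ t, pvBlank l = true)
    (out : List (List String)) :
    List.foldl pvStepA (out, [], true) t = (out, [], true) := by
  induction t with
  | nil => simp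
  | cons x xs ih =>
    have hx : pvBlank x = true := ht x (by simp)
    have hxs : ∀ l ∈ xs, pvBlank l = true := fun l hl => ht l (by simp [hl])
    have hstep : pvStepA (out, [], true) x = (out, [], true) := by
      simp [pvStepA, hx]
    rw [List.foldl_cons, hstep, ih hxs]

-- characterization of pvRunsAux via takeWhile/dropWhile
lemma pvRunsAux_eq (xs : List String) : ∀ (b : Bool) (cur : List String),
    pvRunsAux b cur xs =
      (b, cur.reverse ++ xs.takeWhile (fun l => pvBlank l == b)) ::
        pvRuns (xs.dropWhile (fun l => pvBlank l == b)) := by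
  induction xs with
  | nil => intro b cur; simp [pvRunsAux, pvRuns]
  | cons x xs ih =>
    intro b cur
    by_cases h : pvBlank x = b
    · have h' : (pvBlank x == b) = true := by simp [h]
      simp only [pvRunsAux, List.takeWhile_cons, List.dropWhile_cons, h', if_true]
      rw [ih]
      simp
    · have h' : (pvBlank x == b) = false := by simp [h]
      simp [pvRunsAux, h', pvRuns]

lemma pvRuns_cons (x : String) (xs : List String) :
    pvRuns (x :: xs) =
      (pvBlank x, x :: xs.takeWhile (fun l => pvBlank l == pvBlank x)) ::
        pvRuns (xs.dropWhile (fun l => pvBlank l == pvBlank x)) := by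
  show pvRunsAux (pvBlank x) [x] xs = _
  rw [pvRunsAux_eq]
  simp

-- head of the dropWhile remainder fails the predicate
lemma dropWhile_head_false {α : Type} (p : α → Bool) :
    ∀ (xs : List α) (y : α) (ys : List α), xs.dropWhile p = y :: ys → p y = false := by
  intro xs
  induction xs with
  | nil => intro y ys h; simp [List.dropWhile] at h
  | cons x xs ih =>
    intro y ys h
    rw [List.dropWhile_cons] at h
    by_cases hx : p x = true
    · simp [hx] at h; exact ih y ys h
    · simp [hx] at h
      rcases h with ⟨h1, _⟩
      subst h1
      simpa using hx

-- main lemma: A's fold from a run boundary equals B's walk over pvRuns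
lemma pv_main : ∀ (n : Nat) (xs : List String), xs.length ≤ n →
    ∀ (out : List (List String)) (doc : List String) (p : Bool),
      (∀ y ys, xs = y :: ys → pvBlank y = true → p = false) →
      pvFinA (List.foldl pvStepA (out, doc, p) xs) = out ++ pvGoB doc (pvRuns xs) := by
  intro n
  induction n with
  | zero =>
    intro xs hlen out doc p _
    have hxs : xs = [] := by cases xs <;> simp_all
    subst hxs
    simp [pvRuns, pvGoB, pvFinA_eq]
  | succ n ih =>
    intro xs hlen out doc p hp
    cases xs with
    | nil => simp [pvRuns, pvGoB, pvFinA_eq]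
    | cons x xs =>
      obtain ⟨t, ht⟩ : ∃ t, t = xs.takeWhile (fun l => pvBlank l == pvBlank x) := ⟨_, rfl⟩
      obtain ⟨d, hd⟩ : ∃ d, d = xs.dropWhile (fun l => pvBlank l == pvBlank x) := ⟨_, rfl⟩
      have htmem : ∀ l ∈ t, pvBlank l = pvBlank x := by
        intro l hl
        rw [ht] at hl
        have := List.mem_takeWhile_imp hl
        simpa using this
      have hsplit : xs = t ++ d := by
        rw [ht, hd]; exact (List.takeWhile_append_dropWhile).symm
      have hdlen : d.length ≤ n := by
        have h1 : d.length ≤ xs.length := hd ▸ List.length_dropWhile_le _ _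
        simp at hlen; omega
      have hdhead : ∀ y ys, d = y :: ys → pvBlank y = !(pvBlank x) := by
        intro y ys h
        have h2 := dropWhile_head_false _ xs y ys (by rw [← hd]; exact h)
        revert h2
        cases pvBlank x <;> cases pvBlank y <;> simp
      rw [pvRuns_cons, ← ht, ← hd]
      cases hbx : pvBlank x with
      | false =>
        -- non-blank run: every line of x :: t is appended to document
        have hstep : pvStepA (out, doc, p) x = (out, doc ++ [x], false) := by
          cases p <;> simp [pvStepA, hbx]
        have htf : ∀ l ∈ t, pvBlank l = false := fun l hl => by rw [htmem l hl, hbx]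
        rw [hsplit, List.foldl_cons, hstep, List.foldl_append, foldA_nonblank t htf]
        have hih := ih d hdlen out (doc ++ [x] ++ t) false (by intro _ _ _ _; rfl)
        rw [hih]
        simp [pvGoB]
      | true =>
        -- blank run: first blank is appended; a second blank yields the document
        have hpf : p = false := hp x xs rfl hbx
        subst hpf
        have hstep : pvStepA (out, doc, false) x = (out, doc ++ [x], true) := by
          simp [pvStepA, hbx]
        have htt : ∀ l ∈ t, pvBlank l = true := fun l hl => by rw [htmem l hl, hbx]
        have hdnb : ∀ y ys, d = y :: ys → pvBlank y = true → (true : Bool) = false := by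
          intro y ys h hby
          rw [hdhead y ys h, hbx] at hby
          simp at hby
        rw [hsplit, List.foldl_cons, hstep, List.foldl_append]
        cases t with
        | nil =>
          -- run of length 1: no yield
          have hih := ih d hdlen out (doc ++ [x]) true hdnb
          simp only [List.foldl_nil]
          rw [hih]
          simp [pvGoB]
        | cons z zs =>
          -- run of length ≥ 2: yield document after the second blank, rest is idle
          have hz : pvBlank z = true := htt z (List.mem_cons_self ..)
          have hzs : ∀ l ∈ zs, pvBlank l = true := fun l hl => htt l (List.mem_cons_of_mem _ hl)
          have hstepz : pvStepA (out, doc ++ [x], true) z = (out ++ [doc ++ [x]], [], true) := by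
            simp [pvStepA, hz]
          rw [List.foldl_cons, hstepz, foldA_blank_idle zs hzs]
          have hih := ih d hdlen (out ++ [doc ++ [x]]) [] true hdnb
          rw [hih]
          simp [pvGoB]
-- ===== VERDICT (by name: the statement is the Claim_ definition above) =====
theorem collect_documents_spec : Claim_equal_collect_documents := by
  intro lines _
  show collect_documents lines = collect_documents_alt lines
  have h := pv_main lines.length lines le_rfl [] [] false (by intro _ _ _ _; rfl)
  simpa [collect_documents, collect_documents_alt, pvFinA] using h
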